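-- pv_equiv track=rewrite | github.com/taraschornyiplv/petunia | src/petunia/Topology.py | tokIfName
-- ===== SOURCE A (Python) =====
-- def tokIfName(ifName):
--
--     while ifName:
--
--         if ifName[0] >= '0' and ifName[0] <= '9':
--             n = 0
--             while ifName and ifName[0] >= '0' and ifName[0] <= '9':
--                 n = n * 10 + ord(ifName[0]) - ord('0')
--                 ifName = ifName[1:]
--             yield (n, "")
--             continue
--
--         s = ""
--         while ifName and (ifName[0] < '0' or ifName[0] > '9'):
--             s += ifName[0]
--             ifName = ifName[1:]
--         yield (-1, s)
-- ===== SOURCE B (Python) =====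
-- import re
--
-- def tokIfName(ifName):
--     for m in re.finditer(r'[0-9]+|[^0-9]+', ifName):
--         t = m.group()
--         if '0' <= t[0] <= '9':
--             yield (int(t), "")
--         else:
--             yield (-1, t)
-- ===== Notes on version B (the rewrite author's own statement) =====
-- stated objective: faster
-- what changed: Replaces the nested while-loops with manual slicing (ifName = ifName[1:] copies the string each step) by a single regex pass (re.finditer on '[0-9]+|[^0-9]+') over maximal digit/non-digit runs, converting digit runs with int().
import Mathlib
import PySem

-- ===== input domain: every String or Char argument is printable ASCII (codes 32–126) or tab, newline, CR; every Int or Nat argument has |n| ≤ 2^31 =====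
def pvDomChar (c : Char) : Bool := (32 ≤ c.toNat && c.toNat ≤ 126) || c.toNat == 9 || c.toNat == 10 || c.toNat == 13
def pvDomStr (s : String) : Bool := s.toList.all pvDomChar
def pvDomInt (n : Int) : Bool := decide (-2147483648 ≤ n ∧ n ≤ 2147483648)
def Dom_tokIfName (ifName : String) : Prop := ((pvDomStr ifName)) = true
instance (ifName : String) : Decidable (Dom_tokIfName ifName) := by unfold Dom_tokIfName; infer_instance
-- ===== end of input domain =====

-- B replaces A's nested while-loops (manual index scan, slicing, digit accumulation)
-- by one regex-style pass splitting the string into maximal digit/non-digit runs (idiomatic).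

-- ===== PORT A =====
-- A's character test 'c >= '0' and c <= '9''
def pvIsDig (c : Char) : Bool := '0' ≤ c && c ≤ '9'

-- A's inner digit while-loop: n = n*10 + ord(c) - ord('0'); ifName = ifName[1:]
def pvDigitLoop (n : Int) : List Char → Int × List Char
  | [] => (n, [])
  | c :: cs => if pvIsDig c then pvDigitLoop (n * 10 + ((c.toNat : Int) - 48)) cs else (n, c :: cs)

-- A's inner string while-loop: s += c; ifName = ifName[1:]
def pvStrLoop (s : String) : List Char → String × List Char
  | [] => (s, [])
  | c :: cs => if !pvIsDig c then pvStrLoop (s.push c) cs else (s, c :: cs)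

theorem pvDigitLoop_len (n : Int) (l : List Char) : (pvDigitLoop n l).2.length ≤ l.length := by
  induction l generalizing n with
  | nil => simp [pvDigitLoop]
  | cons c cs ih =>
    simp only [pvDigitLoop]
    split
    · exact le_trans (ih _) (Nat.le_succ _)
    · simp

theorem pvStrLoop_len (s : String) (l : List Char) : (pvStrLoop s l).2.length ≤ l.length := by
  induction l generalizing s with
  | nil => simp [pvStrLoop]
  | cons c cs ih =>
    simp only [pvStrLoop]
    split
    · exact le_trans (ih _) (Nat.le_succ _)
    · simp

-- A's outer while-loop over the remaining characters
def pvTokA : List Char → List (Int × String)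
  | [] => []
  | c :: cs =>
    if h : pvIsDig c then
      let p := pvDigitLoop (0 * 10 + ((c.toNat : Int) - 48)) cs
      (p.1, "") :: pvTokA p.2
    else
      let p := pvStrLoop ("".push c) cs
      (-1, p.1) :: pvTokA p.2
  termination_by l => l.length
  decreasing_by
  · exact Nat.lt_succ_of_le (pvDigitLoop_len _ cs)
  · exact Nat.lt_succ_of_le (pvStrLoop_len _ cs)

def tokIfName (ifName : String) : List (Int × String) := pvTokA ifName.toList

-- ===== PORT B =====
-- re.finditer(r'[0-9]+|[^0-9]+', ·): the list of maximal runs of same digit-class characters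
def pvRunsB : List Char → List (List Char)
  | [] => []
  | c :: cs =>
    (c :: cs.takeWhile (fun d => pvIsDig d == pvIsDig c))
      :: pvRunsB (cs.dropWhile (fun d => pvIsDig d == pvIsDig c))
  termination_by l => l.length
  decreasing_by exact Nat.lt_succ_of_le (List.length_dropWhile_le _ _)

-- int(t) on a digit-only run t
def pvRunVal (r : List Char) : Int := r.foldl (fun n c => n * 10 + ((c.toNat : Int) - 48)) 0

def tokIfName_alt (ifName : String) : List (Int × String) :=
  (pvRunsB ifName.toList).map (fun r =>
    if pvIsDig (r.headD ' ') then (pvRunVal r, "") else (-1, String.ofList r))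

-- ===== PRECONDITION & SPEC =====
def Spec_tokIfName (ifName : String) (out : List (Int × String)) : Prop := out = tokIfName_alt ifName
instance (ifName : String) (out : List (Int × String)) : Decidable (Spec_tokIfName ifName out) := by unfold Spec_tokIfName; infer_instance

-- ===== CLAIM (what is proved, stated in full; the proofs are below) =====
def Claim_equal_tokIfName : Prop := ∀ (ifName : String), Dom_tokIfName ifName → Spec_tokIfName ifName (tokIfName ifName)

-- ===== LEMMAS AND PROOFS =====

theorem pvDigitLoop_eq (n : Int) (l : List Char) :
    pvDigitLoop n l =
      ((l.takeWhile pvIsDig).foldl (fun n c => n * 10 + ((c.toNat : Int) - 48)) n,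
       l.dropWhile pvIsDig) := by
  induction l generalizing n with
  | nil => simp [pvDigitLoop]
  | cons c cs ih =>
    simp only [pvDigitLoop, List.takeWhile, List.dropWhile]
    by_cases h : pvIsDig c = true
    · simp [h, ih]
    · simp [h]

theorem pvStrLoop_eq (s : String) (l : List Char) :
    pvStrLoop s l =
      (String.ofList (s.toList ++ l.takeWhile (fun d => !pvIsDig d)),
       l.dropWhile (fun d => !pvIsDig d)) := by
  induction l generalizing s with
  | nil => simp [pvStrLoop]
  | cons c cs ih =>
    simp only [pvStrLoop, List.takeWhile, List.dropWhile]
    by_cases h : pvIsDig c = true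
    · simp [h]
    · simp [h, ih]

theorem pvTokA_eq_runsB (l : List Char) :
    pvTokA l = (pvRunsB l).map (fun r =>
      if pvIsDig (r.headD ' ') then (pvRunVal r, "") else (-1, String.ofList r)) := by
  induction l using pvRunsB.induct with
  | case1 => simp [pvTokA, pvRunsB]
  | case2 c cs ih =>
    by_cases h : pvIsDig c = true
    · have hp : (fun d => pvIsDig d == pvIsDig c) = pvIsDig := by
        funext d; simp [h]
      rw [hp] at ih
      simp [pvTokA, pvRunsB, h, pvDigitLoop_eq, pvRunVal, ih]
    · have hp : (fun d => pvIsDig d == pvIsDig c) = (fun d => !pvIsDig d) := by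
        funext d; simp [h]
      rw [hp] at ih
      simp [pvTokA, pvRunsB, h, pvStrLoop_eq, ih]

-- ===== VERDICT (by name: the statement is the Claim_ definition above) =====
theorem tokIfName_spec : Claim_equal_tokIfName := by
  intro ifName _
  unfold Spec_tokIfName tokIfName tokIfName_alt
  exact pvTokA_eq_runsB _
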